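-- pv_equiv track=rewrite | github.com/marangiop/kmer_identifier | submission_code.py | count_kmer_at_positions_across_sequences
-- ===== SOURCE A (Python) =====
-- def count_kmer_at_positions_across_sequences(dna_list, kmer_length, kmer_1):
--     kmers= {}
--     for dna_sequence in dna_list:
--         for position in range(len(dna_sequence)-kmer_length+1):
--             kmer= dna_sequence[position:position+kmer_length]
--             if kmer == kmer_1:   #This checks whether the kmer being generated at that position (kmer) is equal to any kmer that is fed into the function (kmer_1)
--                 kmers[position]= kmers.get(position, 0) +1  #This looks up the current count for that position and adds 1. The position acts as a key in the dict and the count is a stored as an integer value assigned to each position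
--     for position in range(len(dna_sequence) - kmer_length + 1):
--         if position not in kmers: #If a position has not been assigned any count and is therefore not present in the dict kmers, which holds the count at each position
--             kmers[position] = 0 #The default value of such entry is set to 0
--     return kmers #This returns a dict holding the count of a given kmer at all positions across a list of DNA sequences.
-- ===== SOURCE B (Python) =====
-- def count_kmer_at_positions_across_sequences(dna_list, kmer_length, kmer_1):
--     # Locate occurrences with str.find instead of slicing a window at every position.
--     counts = {}
--     for seq in dna_list:
--         if len(kmer_1) == kmer_length:
--             # only a pattern of the window length can ever equal a window
--             i = seq.find(kmer_1)
--             while i != -1: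
--                 counts[i] = counts.get(i, 0) + 1
--                 i = seq.find(kmer_1, i + 1)
--     last = dna_list[-1]
--     for position in range(len(last) - kmer_length + 1):
--         if position not in counts:
--             counts[position] = 0
--     return counts
-- ===== Notes on version B (the rewrite author's own statement) =====
-- stated objective: faster
-- what changed: Instead of slicing out and comparing a length-k window at every position of every sequence, B runs one str.find scan per sequence that jumps from occurrence to occurrence of kmer_1 (and searches only when len(kmer_1) == kmer_length, since no other pattern can equal a window).
-- outside the precondition, e.g. on count_kmer_at_positions_across_sequences(['a ', ''], -2, ''): A returns {0: 2, 1: 2, 2: 2, 3: 1, 4: 1}, B returns {0: 0, 1: 0, 2: 0}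
import Mathlib
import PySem

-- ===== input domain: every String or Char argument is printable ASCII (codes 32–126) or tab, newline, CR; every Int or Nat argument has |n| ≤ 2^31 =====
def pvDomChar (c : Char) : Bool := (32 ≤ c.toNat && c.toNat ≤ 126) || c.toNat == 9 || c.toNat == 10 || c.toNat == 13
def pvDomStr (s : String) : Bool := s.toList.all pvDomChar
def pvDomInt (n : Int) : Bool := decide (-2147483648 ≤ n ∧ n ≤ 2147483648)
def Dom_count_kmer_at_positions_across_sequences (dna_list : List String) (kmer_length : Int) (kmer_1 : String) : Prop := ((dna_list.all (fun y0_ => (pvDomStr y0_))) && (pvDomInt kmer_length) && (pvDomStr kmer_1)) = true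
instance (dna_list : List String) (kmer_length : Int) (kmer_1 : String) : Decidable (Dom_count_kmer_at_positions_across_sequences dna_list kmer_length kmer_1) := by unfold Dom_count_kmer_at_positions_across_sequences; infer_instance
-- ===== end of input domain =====

-- B replaces A's slice-and-compare of every window by one find-to-find scan per sequence (faster in a timing run).

-- ===== PORT A =====
-- inner loop of A: for position in range(len(seq)-kmer_length+1): if seq[position:position+kmer_length] == kmer_1: kmers[position] = kmers.get(position,0)+1
def pvKmerStepA (kmer_length : Int) (kmer_1 : String) (d : PySem.Dict Int Int) (seq : String) : PySem.Dict Int Int :=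
  (PySem.List.pyRange 0 (PySem.Str.len seq - kmer_length + 1)).foldl
    (fun d position =>
      if PySem.Str.slice seq (some position) (some (position + kmer_length)) = kmer_1 then
        d.insert position (d.getD position 0 + 1)
      else d) d

def count_kmer_at_positions_across_sequences (dna_list : List String) (kmer_length : Int) (kmer_1 : String) : List (Int × Int) :=
  let kmers := dna_list.foldl (pvKmerStepA kmer_length kmer_1) PySem.Dict.empty
  -- Python's second loop reads the loop variable LEFT OVER from the first for-loop (the last sequence);
  -- on dna_list = [] that name is unbound (NameError), excluded by Pre_.
  let dna_sequence := dna_list.getLastD ""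
  let kmers := (PySem.List.pyRange 0 (PySem.Str.len dna_sequence - kmer_length + 1)).foldl
    (fun d position => if d.contains position then d else d.insert position 0) kmers
  kmers.items

-- ===== PORT B =====
-- B's while loop: i = seq.find(kmer_1); while i != -1: counts[i] += 1; i = seq.find(kmer_1, i+1)
-- fuel (= len(seq)+1, an upper bound on the number of occurrences) only makes the recursion total.
def pvKmerFindLoop (s pat : List Char) (fuel : Nat) (d : PySem.Dict Int Int) (i : Int) : PySem.Dict Int Int :=
  match fuel with
  | 0 => d
  | fuel + 1 =>
    if i = -1 then d
    else pvKmerFindLoop s pat fuel (d.insert i (d.getD i 0 + 1)) (PySem.Chars.findFrom s pat (i + 1))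

def pvKmerStepB (kmer_length : Int) (kmer_1 : String) (d : PySem.Dict Int Int) (seq : String) : PySem.Dict Int Int :=
  if PySem.Str.len kmer_1 = kmer_length then
    pvKmerFindLoop seq.toList kmer_1.toList (seq.toList.length + 1) d (PySem.Str.find seq kmer_1)
  else d

def count_kmer_at_positions_across_sequences_alt (dna_list : List String) (kmer_length : Int) (kmer_1 : String) : List (Int × Int) :=
  let counts := dna_list.foldl (pvKmerStepB kmer_length kmer_1) PySem.Dict.empty
  -- last = dna_list[-1]  (IndexError on [], excluded by Pre_)
  let last := (PySem.List.pyGet? dna_list (-1)).getD ""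
  let counts := (PySem.List.pyRange 0 (PySem.Str.len last - kmer_length + 1)).foldl
    (fun d position => if d.contains position then d else d.insert position 0) counts
  counts.items

-- ===== PRECONDITION & SPEC =====
-- Pre_ excludes (a) dna_list = [], where A raises NameError (its fill loop reads the unbound loop
-- variable), and (b) negative kmer_length, outside the natural domain of a length: there A's slice
-- seq[position:position+kmer_length] wraps to the END of the sequence and A "matches" windows of an
-- unrelated length, an artefact of Python slicing that B does not mimic.
def Pre_count_kmer_at_positions_across_sequences (dna_list : List String) (kmer_length : Int) (kmer_1 : String) : Prop :=
  dna_list ≠ [] ∧ 0 ≤ kmer_length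
instance (dna_list : List String) (kmer_length : Int) (kmer_1 : String) : Decidable (Pre_count_kmer_at_positions_across_sequences dna_list kmer_length kmer_1) := by unfold Pre_count_kmer_at_positions_across_sequences; infer_instance

def pvWitness_count_kmer_at_positions_across_sequences : List String × Int × String := (["ACACA", "GACAT"], 3, "ACA")

def Spec_count_kmer_at_positions_across_sequences (dna_list : List String) (kmer_length : Int) (kmer_1 : String) (out : List (Int × Int)) : Prop := out = count_kmer_at_positions_across_sequences_alt dna_list kmer_length kmer_1
instance (dna_list : List String) (kmer_length : Int) (kmer_1 : String) (out : List (Int × Int)) : Decidable (Spec_count_kmer_at_positions_across_sequences dna_list kmer_length kmer_1 out) := by unfold Spec_count_kmer_at_positions_across_sequences; infer_instance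

-- ===== CLAIM (what is proved, stated in full; the proofs are below) =====
def Claim_equal_count_kmer_at_positions_across_sequences : Prop := ∀ (dna_list : List String) (kmer_length : Int) (kmer_1 : String), Dom_count_kmer_at_positions_across_sequences dna_list kmer_length kmer_1 → Pre_count_kmer_at_positions_across_sequences dna_list kmer_length kmer_1 → Spec_count_kmer_at_positions_across_sequences dna_list kmer_length kmer_1 (count_kmer_at_positions_across_sequences dna_list kmer_length kmer_1)

-- ===== LEMMAS AND PROOFS =====

-- the match positions of pat in s, in increasing order, as the B-side insert-fold visits them
def pvGoodIdx (s pat : List Char) (k n : Nat) : List Nat :=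
  (List.range' k n).filter (fun j => decide (pat <+: s.drop j))

-- the dict update both programs perform at a match position
def pvBump (d : PySem.Dict Int Int) (j : Nat) : PySem.Dict Int Int :=
  d.insert (j : Int) (d.getD (j : Int) 0 + 1)

lemma pvClamp (n : Nat) (k : Int) (h0 : 0 ≤ k) (h : k ≤ n) : PySem.List.clampIdx n k = k.toNat := by
  simp only [PySem.List.clampIdx, if_neg (by omega : ¬ k < 0)]
  omega

lemma pvFoldlId {α β : Type} (l : List α) (f : β → α → β) (d : β)
    (h : ∀ d x, x ∈ l → f d x = d) : l.foldl f d = d := by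
  induction l generalizing d with
  | nil => rfl
  | cons a t ih =>
    rw [List.foldl_cons, h d a (by simp)]
    exact ih d (fun d x hx => h d x (by simp [hx]))

lemma pvFoldlIfFilter {α β : Type} (l : List α) (p : α → Prop) [DecidablePred p] (f : β → α → β) (d : β) :
    l.foldl (fun d x => if p x then f d x else d) d = (l.filter (fun x => decide (p x))).foldl f d := by
  induction l generalizing d with
  | nil => rfl
  | cons a t ih => by_cases h : p a <;> simp [h, ih]

-- a find() start past the end of s answers -1 (CPython quirk, kept by PySem)
lemma pvFindFrom_past (s pat : List Char) :
    PySem.Chars.findFrom s pat ((s.length : Int) + 1) = -1 := by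
  simp only [PySem.Chars.findFrom]
  split_ifs <;> first | rfl | omega

lemma pvKmerFindLoop_neg (s pat : List Char) (fuel : Nat) (d : PySem.Dict Int Int) :
    pvKmerFindLoop s pat fuel d (-1) = d := by
  cases fuel <;> simp [pvKmerFindLoop]

-- B's while loop, started at find(pat, k), performs exactly one bump per match position ≥ k
lemma pvKmerFindLoop_eq (s pat : List Char) :
    ∀ (fuel k : Nat) (d : PySem.Dict Int Int), k ≤ s.length → s.length + 1 - k ≤ fuel →
    pvKmerFindLoop s pat fuel d (PySem.Chars.findFrom s pat (k : Int)) =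
      (pvGoodIdx s pat k (s.length + 1 - k)).foldl pvBump d := by
  intro fuel
  induction fuel with
  | zero => intro k d hk hf; omega
  | succ fuel ih =>
    intro k d hk hf
    by_cases hneg : PySem.Chars.findFrom s pat (k : Int) = -1
    · rw [hneg, pvKmerFindLoop_neg]
      have hnone : pvGoodIdx s pat k (s.length + 1 - k) = [] := by
        rw [pvGoodIdx, List.filter_eq_nil_iff]
        intro j hj
        have hjk : k ≤ j ∧ j < k + (s.length + 1 - k) := List.mem_range'_1.mp hj
        simp only [decide_eq_true_eq]
        intro hpre
        have : pat <:+: s.drop k := by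
          have : s.drop j = (s.drop k).drop (j - k) := by
            rw [List.drop_drop]; congr 1; omega
          rw [this] at hpre
          exact hpre.isInfix.trans (List.drop_suffix _ _).isInfix
        exact ((PySem.Chars.findFrom_natCast_eq_neg_one_iff s pat k hk).mp hneg) this
      rw [hnone]; rfl
    · obtain ⟨hge, hpre, hmin⟩ := PySem.Chars.findFrom_natCast_spec s pat k hk hneg
      set j : Nat := (PySem.Chars.findFrom s pat (k : Int)).toNat with hj
      have h0 : (0:Int) ≤ PySem.Chars.findFrom s pat (k : Int) := le_trans (by exact_mod_cast Nat.zero_le k) hge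
      have hcast : PySem.Chars.findFrom s pat (k : Int) = (j : Int) := (Int.toNat_of_nonneg h0).symm
      clear_value j
      have hjk : k ≤ j := by exact_mod_cast hcast ▸ hge
      have hjle : j ≤ s.length := by
        have h2 := PySem.Chars.findFrom_natCast s pat k hk
        rw [hcast] at h2
        split_ifs at h2 with hfind
        have h3 := PySem.Chars.find_le_length (s.drop k) pat
        rw [List.length_drop] at h3
        omega
      have hsplit : pvGoodIdx s pat k (s.length + 1 - k) =
          (pvGoodIdx s pat k (j - k)) ++ j :: pvGoodIdx s pat (j+1) (s.length - j) := by
        rw [pvGoodIdx, pvGoodIdx, pvGoodIdx]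
        have hr : List.range' k (s.length + 1 - k) = List.range' k (j - k) ++ List.range' j (s.length + 1 - j) := by
          have := @List.range'_append k (j - k) (s.length + 1 - j) 1
          simp only [one_mul] at this
          rw [show k + (j - k) = j by omega] at this
          rw [show (j - k) + (s.length + 1 - j) = s.length + 1 - k by omega] at this
          exact this.symm
        rw [hr, List.filter_append]
        congr 1
        rw [show s.length + 1 - j = (s.length - j) + 1 by omega, List.range'_succ, List.filter_cons]
        simp only [hpre, decide_true, if_true]
      have hnilfirst : pvGoodIdx s pat k (j - k) = [] := by
        rw [pvGoodIdx, List.filter_eq_nil_iff]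
        intro x hx
        have hb := List.mem_range'_1.mp hx
        simp only [decide_eq_true_eq]
        exact hmin x hb.1 (by omega)
      rw [hsplit, hnilfirst, List.nil_append, List.foldl_cons]
      rw [hcast, pvKmerFindLoop]
      rw [if_neg (by omega)]
      have harg : (j : Int) + 1 = ((j + 1 : Nat) : Int) := by push_cast; ring
      rw [harg]
      by_cases hj1 : j + 1 ≤ s.length
      · have := ih (j+1) (d.insert (j:Int) (d.getD (j:Int) 0 + 1)) hj1 (by omega)
        rw [this]
        rw [show s.length + 1 - (j + 1) = s.length - j by omega]
        rfl
      · have hje : j = s.length := by omega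
        rw [show ((j + 1 : Nat) : Int) = ((s.length : Int) + 1) by rw [hje]; push_cast; ring,
           pvFindFrom_past, pvKmerFindLoop_neg]
        rw [show s.length - j = 0 by omega]
        rfl

-- A's inner loop equals the same fold over the match positions, when len(kmer_1) == kmer_length
lemma pvStepA_eq_fold (kmer_length : Int) (kmer_1 seq : String) (d : PySem.Dict Int Int)
    (hlen : PySem.Str.len kmer_1 = kmer_length) :
    pvKmerStepA kmer_length kmer_1 d seq =
      (pvGoodIdx seq.toList kmer_1.toList 0 (seq.toList.length + 1)).foldl pvBump d := by
  have hkk : kmer_length = (kmer_1.toList.length : Int) := by rw [← hlen, PySem.Str.len_eq]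
  subst hkk
  set s := seq.toList with hs
  set pat := kmer_1.toList with hpat
  set kk := pat.length with hkkdef
  unfold pvKmerStepA
  rw [PySem.Str.len_eq, ← hs]
  by_cases hLk : kk ≤ s.length
  · rw [show (s.length : Int) - (kk : Int) + 1 = ((s.length + 1 - kk : Nat) : Int) by omega]
    rw [PySem.List.pyRange_zero_natCast, List.foldl_map]
    refine Eq.trans (pvFoldlIfFilter (List.range (s.length + 1 - kk))
      (fun j : Nat => PySem.Str.slice seq (some (j:Int)) (some ((j:Int) + (kk:Int))) = kmer_1) pvBump d) ?_
    congr 1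
    rw [pvGoodIdx, ← List.range_eq_range']
    conv_rhs => rw [show s.length + 1 = (s.length + 1 - kk) + kk by omega, List.range_add, List.filter_append]
    have h2 : (List.map (fun x => s.length + 1 - kk + x) (List.range kk)).filter
        (fun j => decide (pat <+: s.drop j)) = [] := by
      rw [List.filter_eq_nil_iff]
      intro j hjm
      simp only [List.mem_map, List.mem_range] at hjm
      obtain ⟨x, hx, rfl⟩ := hjm
      simp only [decide_eq_true_eq]
      intro hp
      have hl := hp.length_le
      rw [List.length_drop] at hl
      omega
    rw [h2, List.append_nil]
    apply List.filter_congr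
    intro j hjm
    rw [List.mem_range] at hjm
    simp only [decide_eq_decide]
    have hslice : (PySem.Str.slice seq (some (j:Int)) (some ((j:Int) + (kk:Int)))).toList =
        List.take kk (List.drop j s) := by
      rw [PySem.Str.toList_slice]
      simp only [PySem.Chars.slice_eq_listSlice, ← hs]
      exact PySem.List.slice_natCast_add s j kk
    rw [← String.toList_inj, hslice, ← hpat]
    rw [List.prefix_iff_eq_take, ← hkkdef]
    exact eq_comm
  · have hempty : PySem.List.pyRange 0 ((s.length : Int) - (kk : Int) + 1) = [] := by
      simp [PySem.List.pyRange]
      omega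
    rw [hempty, List.foldl_nil]
    have hnone : pvGoodIdx s pat 0 (s.length + 1) = [] := by
      rw [pvGoodIdx, List.filter_eq_nil_iff]
      intro x hx
      simp only [decide_eq_true_eq]
      intro hp
      have hl := hp.length_le
      rw [List.length_drop] at hl
      omega
    rw [hnone]
    rfl

-- when len(kmer_1) != kmer_length (and 0 ≤ kmer_length), no window can equal kmer_1: A's loop is a no-op
lemma pvStepA_eq_id (kmer_length : Int) (kmer_1 seq : String) (d : PySem.Dict Int Int)
    (hk : 0 ≤ kmer_length) (hlen : PySem.Str.len kmer_1 ≠ kmer_length) :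
    pvKmerStepA kmer_length kmer_1 d seq = d := by
  unfold pvKmerStepA
  apply pvFoldlId
  intro d pos hpos
  rw [PySem.Str.len_eq] at hpos
  have hmem := PySem.List.mem_pyRange_one.mp hpos
  rw [if_neg]
  intro heq
  have h1 : (PySem.Str.slice seq (some pos) (some (pos + kmer_length))).toList.length
      = kmer_length.toNat := by
    rw [PySem.Str.toList_slice]
    simp only [PySem.Chars.slice_eq_listSlice]
    rw [PySem.List.length_slice]
    rw [pvClamp _ _ (by omega) (by omega), pvClamp _ _ (by omega) (by omega)]
    omega
  rw [heq] at h1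
  apply hlen
  rw [PySem.Str.len_eq]
  omega

lemma pvStep_eq (kmer_length : Int) (kmer_1 : String) (hk : 0 ≤ kmer_length) :
    pvKmerStepA kmer_length kmer_1 = pvKmerStepB kmer_length kmer_1 := by
  funext d seq
  unfold pvKmerStepB
  by_cases hlen : PySem.Str.len kmer_1 = kmer_length
  · rw [if_pos hlen, pvStepA_eq_fold kmer_length kmer_1 seq d hlen]
    rw [PySem.Str.find_eq, ← PySem.Chars.findFrom_zero]
    have := pvKmerFindLoop_eq seq.toList kmer_1.toList (seq.toList.length + 1) 0 d
      (Nat.zero_le _) (by omega)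
    rw [show ((0 : Nat) : Int) = (0 : Int) by norm_num] at this
    rw [this, Nat.sub_zero]
  · rw [if_neg hlen, pvStepA_eq_id kmer_length kmer_1 seq d hk hlen]

lemma pvLast_eq (dna_list : List String) (h : dna_list ≠ []) :
    (PySem.List.pyGet? dna_list (-1)).getD "" = dna_list.getLastD "" := by
  simp [PySem.List.pyGet?, PySem.List.pyIdx?]
  have hl : 1 ≤ dna_list.length := by
    cases dna_list with | nil => simp at h | cons a t => simp
  rw [if_pos hl]
  simp [List.getLast?_eq_getElem?]

-- ===== VERDICT (by name: the statement is the Claim_ definition above) =====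
theorem count_kmer_at_positions_across_sequences_spec : Claim_equal_count_kmer_at_positions_across_sequences := by
  intro dna_list kmer_length kmer_1 _hdom hpre
  obtain ⟨hne, hk⟩ := hpre
  unfold Spec_count_kmer_at_positions_across_sequences
  unfold count_kmer_at_positions_across_sequences count_kmer_at_positions_across_sequences_alt
  rw [pvStep_eq kmer_length kmer_1 hk, pvLast_eq dna_list hne]
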